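-- pv_equiv track=rewrite | github.com/ihjas-ahammed/task-dominion | patch.py | find_fuzzy_match_index
-- ===== SOURCE A (Python) =====
-- def find_fuzzy_match_index(target_lines_normalized, hunk_search_lines_normalized):
--     """
--     Finds the best starting index for hunk_search_lines in target_lines.
--     Both inputs are lists of normalized (e.g., whitespace-stripped) lines.
--     This version looks for an exact sequence match of normalized lines.
--     """
--     if not hunk_search_lines_normalized:
--         return -1 # Cannot match an empty search pattern
--
--     len_search = len(hunk_search_lines_normalized)
--     len_target = len(target_lines_normalized)
--
--     # Iterate through possible starting positions in the target file
--     for i in range(len_target - len_search + 1):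
--         is_match = True
--         # Compare the slice of target_lines with the hunk's search lines
--         for j in range(len_search):
--             if target_lines_normalized[i+j] != hunk_search_lines_normalized[j]:
--                 is_match = False
--                 break
--         if is_match:
--             return i # Found an exact match of the normalized sequence
--     return -1
-- ===== SOURCE B (Python) =====
-- def find_fuzzy_match_index(target_lines_normalized, hunk_search_lines_normalized):
--     """Rabin-Karp over lines: an additive rolling fingerprint of the current
--     window is maintained in O(1) per shift; a full window comparison is done
--     only when the fingerprint equals the pattern's fingerprint."""
--     t = target_lines_normalized
--     s = hunk_search_lines_normalized
--     if not s:
--         return -1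
--     n, m = len(s), len(t)
--     if n > m:
--         return -1
--     keys = [sum(map(ord, line)) for line in t]
--     pattern_fp = sum(sum(map(ord, line)) for line in s)
--     window_fp = sum(keys[:n])
--     i = 0
--     while True:
--         if window_fp == pattern_fp and t[i:i + n] == s:
--             return i
--         if i + n >= m:
--             return -1
--         window_fp += keys[i + n] - keys[i]
--         i += 1
-- ===== Notes on version B (the rewrite author's own statement) =====
-- stated objective: alternative
-- what changed: Replaced A's nested index loops with Rabin-Karp over lines: per-line integer keys are computed once, an additive rolling fingerprint of the current window is updated in O(1) per shift, and a full window comparison runs only when the fingerprint matches the pattern's.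
import Mathlib
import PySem

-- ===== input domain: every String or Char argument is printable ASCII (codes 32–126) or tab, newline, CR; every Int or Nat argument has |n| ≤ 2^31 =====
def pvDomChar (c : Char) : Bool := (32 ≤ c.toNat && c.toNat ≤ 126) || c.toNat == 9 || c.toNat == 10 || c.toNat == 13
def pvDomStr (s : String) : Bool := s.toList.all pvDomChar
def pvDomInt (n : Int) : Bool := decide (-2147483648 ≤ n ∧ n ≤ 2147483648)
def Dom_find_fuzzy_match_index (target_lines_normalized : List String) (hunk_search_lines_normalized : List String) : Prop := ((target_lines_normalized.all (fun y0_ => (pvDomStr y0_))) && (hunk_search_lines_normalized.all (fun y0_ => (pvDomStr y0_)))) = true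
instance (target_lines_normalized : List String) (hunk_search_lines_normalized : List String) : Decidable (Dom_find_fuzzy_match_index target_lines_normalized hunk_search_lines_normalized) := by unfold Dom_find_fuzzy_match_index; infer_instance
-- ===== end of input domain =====

-- B replaces A's nested index loops by Rabin-Karp over lines (per-line keys computed once,
-- an additive rolling window fingerprint, verification only on fingerprint match); objective: alternative.


-- ===== PORT A =====
-- inner loop: `for j in range(len_search): if t[i+j] != s[j]: is_match = False; break`
-- (the outer loop only calls it with i + s.length ≤ t.length, so getD never pads)
def pvAInner (t s : List String) (i : Nat) (j : Nat) : Bool :=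
  if j < s.length then
    if t.getD (i + j) "" ≠ s.getD j "" then false
    else pvAInner t s i (j + 1)
  else true
termination_by s.length - j

-- outer loop: `for i in range(len_target - len_search + 1): … return i` / `return -1`
def pvALoop (t s : List String) : List Nat → Int
  | [] => -1
  | i :: rest => if pvAInner t s i 0 then (i : Int) else pvALoop t s rest

def find_fuzzy_match_index (target_lines_normalized : List String) (hunk_search_lines_normalized : List String) : Int :=
  if hunk_search_lines_normalized = [] then -1
  else
    pvALoop target_lines_normalized hunk_search_lines_normalized
      (List.range (((target_lines_normalized.length : Int) - hunk_search_lines_normalized.length + 1).toNat))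

-- ===== PORT B =====
-- `sum(map(ord, line))`
def pvKeyB (line : String) : Int := (line.toList.map (fun c => (c.toNat : Int))).sum

-- the `while True` loop of Source B: check fingerprint (+ verify), stop at i + n >= m, else roll the
-- fingerprint by one position
def pvBScan (t s : List String) (keys : List Int) (n m : Nat) (pfp : Int) (i : Nat) (wfp : Int) : Int :=
  if wfp = pfp ∧ PySem.List.slice t (some (i : Int)) (some ((i : Int) + (n : Int))) = s then (i : Int)
  else if m ≤ i + n then -1
  else pvBScan t s keys n m pfp (i + 1) (wfp + keys.getD (i + n) 0 - keys.getD i 0)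
termination_by m - i
decreasing_by omega

def find_fuzzy_match_index_alt (target_lines_normalized : List String) (hunk_search_lines_normalized : List String) : Int :=
  if hunk_search_lines_normalized = [] then -1
  else
    let n := hunk_search_lines_normalized.length
    let m := target_lines_normalized.length
    if n > m then -1
    else
      let keys := target_lines_normalized.map pvKeyB
      let pfp := (hunk_search_lines_normalized.map pvKeyB).sum
      let wfp := (keys.take n).sum
      pvBScan target_lines_normalized hunk_search_lines_normalized keys n m pfp 0 wfp

-- ===== PRECONDITION & SPEC =====
def Spec_find_fuzzy_match_index (target_lines_normalized : List String) (hunk_search_lines_normalized : List String) (out : Int) : Prop := out = find_fuzzy_match_index_alt target_lines_normalized hunk_search_lines_normalized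
instance (target_lines_normalized : List String) (hunk_search_lines_normalized : List String) (out : Int) : Decidable (Spec_find_fuzzy_match_index target_lines_normalized hunk_search_lines_normalized out) := by unfold Spec_find_fuzzy_match_index; infer_instance

-- ===== CLAIM (what is proved, stated in full; the proofs are below) =====
def Claim_equal_find_fuzzy_match_index : Prop := ∀ (target_lines_normalized : List String) (hunk_search_lines_normalized : List String), Dom_find_fuzzy_match_index target_lines_normalized hunk_search_lines_normalized → Spec_find_fuzzy_match_index target_lines_normalized hunk_search_lines_normalized (find_fuzzy_match_index target_lines_normalized hunk_search_lines_normalized)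

-- ===== LEMMAS AND PROOFS =====

-- fingerprint of the window starting at i
def pvWinSum (t : List String) (n i : Nat) : Int := (((t.drop i).take n).map pvKeyB).sum

-- A's inner loop from position j decides the window equality of the remaining suffixes.
lemma pvAInner_iff (t s : List String) (i : Nat) :
    ∀ d j, d = s.length - j → i + s.length ≤ t.length → j ≤ s.length →
    (pvAInner t s i j = true ↔ (t.drop (i + j)).take (s.length - j) = s.drop j) := by
  intro d
  induction d with
  | zero =>
    intro j hd hb hj
    have hj' : j = s.length := by omega
    subst hj'
    rw [pvAInner]
    simp
  | succ k ih =>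
    intro j hd hb hj
    have hjlt : j < s.length := by omega
    have hit : i + j < t.length := by omega
    rw [pvAInner, if_pos hjlt]
    have hdrop_t : t.drop (i + j) = t[i + j] :: t.drop (i + j + 1) :=
      List.drop_eq_getElem_cons hit
    have hdrop_s : s.drop j = s[j] :: s.drop (j + 1) :=
      List.drop_eq_getElem_cons hjlt
    have hlen : s.length - j = (s.length - (j + 1)) + 1 := by omega
    have hgt : t.getD (i + j) "" = t[i + j] := List.getD_eq_getElem _ _ hit
    have hgs : s.getD j "" = s[j] := List.getD_eq_getElem _ _ hjlt
    by_cases hne : t.getD (i + j) "" ≠ s.getD j ""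
    · rw [if_pos hne]
      constructor
      · intro h; exact absurd h (by simp)
      · intro h
        rw [hdrop_t, hdrop_s, hlen, List.take_succ_cons] at h
        exact absurd (by rw [hgt, hgs, (List.cons.injEq _ _ _ _).mp h |>.1]) hne
    · rw [if_neg hne]
      rw [not_not] at hne
      rw [ih (j + 1) (by omega) hb (by omega)]
      rw [hdrop_t, hdrop_s, hlen, List.take_succ_cons]
      constructor
      · intro h
        rw [List.cons.injEq]
        refine ⟨by rw [← hgt, ← hgs]; exact hne, by rw [show i + j + 1 = i + (j + 1) by omega]; exact h⟩
      · intro h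
        have := (List.cons.injEq _ _ _ _).mp h |>.2
        rw [show i + (j + 1) = i + j + 1 by omega]
        exact this

-- keys[i] = key of t[i]
lemma pvKeys_getD (t : List String) (i : Nat) (h : i < t.length) :
    (t.map pvKeyB).getD i 0 = pvKeyB t[i] := by
  rw [List.getD_eq_getElem _ _ (by simpa using h)]
  simp

-- the rolling update: window fingerprint at i+1 from the one at i
lemma pvWinSum_step (t : List String) (n i : Nat) (hn : 1 ≤ n) (h : i + n < t.length) :
    pvWinSum t n (i + 1) = pvWinSum t n i + pvKeyB t[i + n] - pvKeyB t[i] := by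
  obtain ⟨k, rfl⟩ : ∃ k, n = k + 1 := ⟨n - 1, by omega⟩
  have hi : i < t.length := by omega
  have hdt : t.drop i = t[i] :: t.drop (i + 1) := List.drop_eq_getElem_cons hi
  have hkd : k < (t.drop (i + 1)).length := by simp; omega
  have htake : (t.drop (i + 1)).take (k + 1) = (t.drop (i + 1)).take k ++ [(t.drop (i + 1))[k]] := by
    rw [List.take_add_one, List.getElem?_eq_getElem hkd]
    simp
  have hgd : (t.drop (i + 1))[k] = t[i + 1 + k] := by
    rw [List.getElem_drop]
  unfold pvWinSum
  rw [htake, hgd, hdt, List.take_succ_cons]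
  simp [List.map_append, List.sum_append]
  rw [show t[i + 1 + k] = t[i + (k + 1)] from by congr 1; omega]
  ring

-- B's scan at position i with the correct window fingerprint equals A's scan from i onwards.
lemma pvScan_eq (t s : List String) (hs : s ≠ []) :
    ∀ d i, d = t.length - i → i + s.length ≤ t.length →
    pvBScan t s (t.map pvKeyB) s.length t.length ((s.map pvKeyB).sum) i (pvWinSum t s.length i)
      = pvALoop t s (List.range' i (t.length - s.length + 1 - i)) := by
  have hn : 1 ≤ s.length := List.length_pos_iff.mpr hs
  intro d
  induction d with
  | zero => intro i hd hb; omega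
  | succ c ih =>
    intro i hd hb
    have hslice : PySem.List.slice t (some (i : Int)) (some ((i : Int) + (s.length : Int)))
        = (t.drop i).take s.length := PySem.List.slice_natCast_add t i s.length
    have hInner : pvAInner t s i 0 = true ↔ (t.drop i).take s.length = s := by
      have := pvAInner_iff t s i s.length 0 (by omega) hb (by omega)
      simpa using this
    have hrange : t.length - s.length + 1 - i = (t.length - s.length - i) + 1 := by omega
    rw [hrange, List.range'_succ, pvALoop]
    rw [pvBScan]
    by_cases hw : (t.drop i).take s.length = s
    · have hfp : pvWinSum t s.length i = (s.map pvKeyB).sum := by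
        unfold pvWinSum; rw [hw]
      rw [if_pos ⟨hfp, by rw [hslice, hw]⟩, if_pos (hInner.mpr hw)]
    · rw [if_neg (fun h => hw (hslice ▸ h.2)), if_neg (fun h => hw (hInner.mp h))]
      by_cases hend : t.length ≤ i + s.length
      · have : t.length - s.length - i = 0 := by omega
        rw [if_pos hend, this]
        rfl
      · rw [if_neg hend]
        have hlt : i + s.length < t.length := by omega
        have hroll : pvWinSum t s.length i + (t.map pvKeyB).getD (i + s.length) 0
            - (t.map pvKeyB).getD i 0 = pvWinSum t s.length (i + 1) := by
          rw [pvKeys_getD t (i + s.length) hlt, pvKeys_getD t i (by omega),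
            pvWinSum_step t s.length i hn hlt]
        rw [hroll, ih (i + 1) (by omega) (by omega)]
        have : t.length - s.length + 1 - (i + 1) = t.length - s.length - i := by omega
        rw [this]

-- ===== VERDICT (by name: the statement is the Claim_ definition above) =====
theorem find_fuzzy_match_index_spec : Claim_equal_find_fuzzy_match_index := by
  intro t s _
  unfold Spec_find_fuzzy_match_index find_fuzzy_match_index find_fuzzy_match_index_alt
  by_cases hs : s = []
  · simp [hs]
  · rw [if_neg hs, if_neg hs]
    by_cases hnm : s.length > t.length
    · rw [if_pos hnm]
      have : (((t.length : Int) - s.length + 1)).toNat = 0 := by omega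
      rw [this]
      rfl
    · rw [if_neg hnm]
      push Not at hnm
      have hcnt : (((t.length : Int) - s.length + 1)).toNat = t.length - s.length + 1 := by omega
      have hinit : ((t.map pvKeyB).take s.length).sum = pvWinSum t s.length 0 := by
        unfold pvWinSum
        rw [← List.map_take]
        simp
      rw [hcnt]
      show pvALoop t s (List.range (t.length - s.length + 1))
          = pvBScan t s (t.map pvKeyB) s.length t.length ((s.map pvKeyB).sum) 0
              ((List.take s.length (t.map pvKeyB)).sum)
      rw [hinit]
      have := pvScan_eq t s hs (t.length - 0) 0 rfl (by omega)
      rw [List.range_eq_range']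
      simpa using this.symm
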